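-- pv_equiv track=rewrite | github.com/aws-neuron/neuronx-distributed | src/neuronx_distributed/quantization/dequantize.py | get_broadcastable_shapes_for_blockwise_scale_dequantize
-- ===== SOURCE A (Python) =====
-- def get_broadcastable_shapes_for_blockwise_scale_dequantize(tensor_shape, scale_shape):
--     tensor_shape = list(tensor_shape)
--     scale_shape = list(scale_shape)
--
--     scale_ndim = len(scale_shape)
--     tensor_ndim = len(tensor_shape)
--
--     assert scale_ndim <= tensor_ndim, f"Cannot have more scale dimensions than tensor dimensions: tensor shape {tensor_shape}, scale_shape {scale_shape}"
--     block_axis = []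
--     for d in range(tensor_ndim):
--         if d < scale_ndim:
--             assert scale_shape[d] <= tensor_shape[d], "Scale dimensions cannot be larger than tensor dimensions"
--             if scale_shape[d] != tensor_shape[d]:
--                 assert tensor_shape[d] % scale_shape[d] == 0, "Tensor dimensions must be divisible by scale dimensions for a blocked dimension"
--                 block_axis.append(d)
--         else:
--             # right pad 1s to scale shape
--             scale_shape.append(1)
--             block_axis.append(d)
--
--     assert len(block_axis) > 0, "Scale dimension sizes cannot be the same as tensor dimension sizes: no block dimensions found"
--
--     # add dimensions of size block_size[i] to tensor_shape that are tiled from the axis at block_axis[i]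
--     # add dimensions of size 1 to scale_shape broadcast with the block_size[i] dimension in tensor_shape
--     for ax in reversed(block_axis):
--         # size of the block along this axis
--         size = tensor_shape[ax] // scale_shape[ax]
--         if size == tensor_shape[ax]:
--             continue
--         tensor_shape = tensor_shape[:ax] + [tensor_shape[ax] // size, size] + tensor_shape[ax+1:]
--         scale_shape = scale_shape[:ax] + [scale_shape[ax], 1] + scale_shape[ax+1:]
--
--     return tuple(tensor_shape), tuple(scale_shape)
-- ===== SOURCE B (Python) =====
-- def get_broadcastable_shapes_for_blockwise_scale_dequantize(tensor_shape, scale_shape):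
--     tensor_shape = list(tensor_shape)
--     scale_shape = list(scale_shape)
--
--     n = len(tensor_shape)
--     m = len(scale_shape)
--
--     assert m <= n, f"Cannot have more scale dimensions than tensor dimensions: tensor shape {tensor_shape}, scale_shape {scale_shape}"
--
--     # single validation pass; any dim beyond the scale rank, or with scale != tensor, is a block dim
--     has_block = False
--     for d in range(n):
--         if d < m:
--             assert scale_shape[d] <= tensor_shape[d], "Scale dimensions cannot be larger than tensor dimensions"
--             if scale_shape[d] != tensor_shape[d]:
--                 assert tensor_shape[d] % scale_shape[d] == 0, "Tensor dimensions must be divisible by scale dimensions for a blocked dimension"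
--                 has_block = True
--         else:
--             has_block = True
--     assert has_block, "Scale dimension sizes cannot be the same as tensor dimension sizes: no block dimensions found"
--
--     # single left-to-right pass emitting each dimension's segment directly
--     new_t, new_s = [], []
--     for d in range(n):
--         t = tensor_shape[d]
--         s = scale_shape[d] if d < m else 1
--         if d < m and s != t:
--             size = t // s
--             if size != t:
--                 new_t += [s, size]
--                 new_s += [s, 1]
--                 continue
--         new_t.append(t)
--         new_s.append(s)
--     return tuple(new_t), tuple(new_s)
-- ===== Notes on version B (the rewrite author's own statement) =====
-- stated objective: simpler
-- what changed: Replaces A's collect-block-axes-then-splice-in-reverse-with-list-slicing loop by a single left-to-right pass that emits each dimension's (possibly split) segment directly into the output lists.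
import Mathlib
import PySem

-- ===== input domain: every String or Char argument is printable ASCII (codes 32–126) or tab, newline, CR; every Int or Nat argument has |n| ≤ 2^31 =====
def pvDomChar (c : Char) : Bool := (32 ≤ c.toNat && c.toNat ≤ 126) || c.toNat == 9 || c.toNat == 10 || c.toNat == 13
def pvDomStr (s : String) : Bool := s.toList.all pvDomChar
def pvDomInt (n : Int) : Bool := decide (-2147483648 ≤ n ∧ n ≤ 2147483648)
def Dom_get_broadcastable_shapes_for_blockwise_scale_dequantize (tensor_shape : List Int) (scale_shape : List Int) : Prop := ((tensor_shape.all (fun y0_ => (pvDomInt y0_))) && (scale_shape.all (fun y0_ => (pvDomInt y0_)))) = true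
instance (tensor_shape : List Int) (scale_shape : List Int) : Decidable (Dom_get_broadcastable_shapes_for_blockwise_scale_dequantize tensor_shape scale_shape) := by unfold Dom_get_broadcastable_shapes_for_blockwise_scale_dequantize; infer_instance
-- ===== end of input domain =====

-- B builds both output shapes in one left-to-right pass emitting per-dimension segments,
-- instead of A's collect-block-axes-then-splice-in-reverse loop (objective: simpler decomposition).
-- A's asserts either pass or raise; Pre_ excludes every raising input, so both ports
-- transcribe only the value-producing path (an assert condition contributes no value).

-- ===== PORT A =====
-- first loop of A: pads scale_shape with 1s and collects block_axis
def pyA_loop1 (tensor_shape : List Int) (scale_ndim : Nat) (st : List Int × List Nat) (d : Nat) : List Int × List Nat :=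
  if d < scale_ndim then
    if st.1.getD d 0 ≠ tensor_shape.getD d 0 then (st.1, st.2 ++ [d]) else st
  else (st.1 ++ [1], st.2 ++ [d])

-- second loop of A: splice at axis ax (slices are take/drop: ax is a Nat index in range on Pre_)
def pyA_step (st : List Int × List Int) (ax : Nat) : List Int × List Int :=
  let size := PySem.Int.floordiv (st.1.getD ax 0) (st.2.getD ax 0)
  if size = st.1.getD ax 0 then st
  else (st.1.take ax ++ [PySem.Int.floordiv (st.1.getD ax 0) size, size] ++ st.1.drop (ax+1),
        st.2.take ax ++ [st.2.getD ax 0, 1] ++ st.2.drop (ax+1))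

def get_broadcastable_shapes_for_blockwise_scale_dequantize (tensor_shape : List Int) (scale_shape : List Int) : List Int × List Int :=
  let scale_ndim := scale_shape.length
  let tensor_ndim := tensor_shape.length
  let r1 := (List.range tensor_ndim).foldl (pyA_loop1 tensor_shape scale_ndim) (scale_shape, [])
  (r1.2.reverse).foldl pyA_step (tensor_shape, r1.1)

-- ===== PORT B =====
-- B's single emitting pass (Source B's validation pass only raises; on Pre_ it passes and yields no value)
def pyB_emit (tensor_shape : List Int) (scale_shape : List Int) (m : Nat) (acc : List Int × List Int) (d : Nat) : List Int × List Int :=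
  let t := tensor_shape.getD d 0
  let s := if d < m then scale_shape.getD d 0 else 1
  if d < m ∧ s ≠ t then
    let size := PySem.Int.floordiv t s
    if size ≠ t then (acc.1 ++ [s, size], acc.2 ++ [s, 1])
    else (acc.1 ++ [t], acc.2 ++ [s])
  else (acc.1 ++ [t], acc.2 ++ [s])

def get_broadcastable_shapes_for_blockwise_scale_dequantize_alt (tensor_shape : List Int) (scale_shape : List Int) : List Int × List Int :=
  (List.range tensor_shape.length).foldl (pyB_emit tensor_shape scale_shape scale_shape.length) ([], [])

-- ===== PRECONDITION & SPEC =====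
-- Exactly the inputs where A returns (no AssertionError, no ZeroDivisionError): scale rank ≤ tensor
-- rank, each scale dim ≤ and (when different) dividing its tensor dim, and at least one block dim.
def Pre_get_broadcastable_shapes_for_blockwise_scale_dequantize (tensor_shape : List Int) (scale_shape : List Int) : Prop :=
  scale_shape.length ≤ tensor_shape.length ∧
  (∀ d < scale_shape.length, scale_shape.getD d 0 ≤ tensor_shape.getD d 0 ∧
      (scale_shape.getD d 0 ≠ tensor_shape.getD d 0 → scale_shape.getD d 0 ∣ tensor_shape.getD d 0)) ∧
  (scale_shape.length < tensor_shape.length ∨ ∃ d < scale_shape.length, scale_shape.getD d 0 ≠ tensor_shape.getD d 0)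
instance (tensor_shape : List Int) (scale_shape : List Int) : Decidable (Pre_get_broadcastable_shapes_for_blockwise_scale_dequantize tensor_shape scale_shape) := by unfold Pre_get_broadcastable_shapes_for_blockwise_scale_dequantize; infer_instance

def pvWitness_get_broadcastable_shapes_for_blockwise_scale_dequantize : List Int × List Int := ([4, 3], [2, 3])

def Spec_get_broadcastable_shapes_for_blockwise_scale_dequantize (tensor_shape : List Int) (scale_shape : List Int) (out : List Int × List Int) : Prop := out = get_broadcastable_shapes_for_blockwise_scale_dequantize_alt tensor_shape scale_shape
instance (tensor_shape : List Int) (scale_shape : List Int) (out : List Int × List Int) : Decidable (Spec_get_broadcastable_shapes_for_blockwise_scale_dequantize tensor_shape scale_shape out) := by unfold Spec_get_broadcastable_shapes_for_blockwise_scale_dequantize; infer_instance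

-- ===== CLAIM (what is proved, stated in full; the proofs are below) =====
def Claim_equal_get_broadcastable_shapes_for_blockwise_scale_dequantize : Prop := ∀ (tensor_shape : List Int) (scale_shape : List Int), Dom_get_broadcastable_shapes_for_blockwise_scale_dequantize tensor_shape scale_shape → Pre_get_broadcastable_shapes_for_blockwise_scale_dequantize tensor_shape scale_shape → Spec_get_broadcastable_shapes_for_blockwise_scale_dequantize tensor_shape scale_shape (get_broadcastable_shapes_for_blockwise_scale_dequantize tensor_shape scale_shape)

-- ===== LEMMAS AND PROOFS =====

-- block-dimension predicate of A's first loop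
def blkP (tensor_shape : List Int) (scale_shape : List Int) (d : Nat) : Bool :=
  if d < scale_shape.length then decide (scale_shape.getD d 0 ≠ tensor_shape.getD d 0) else true

-- the per-dimension segment A's second loop produces at a block axis
def segA (tv sv : Int) : List Int × List Int :=
  let size := PySem.Int.floordiv tv sv
  if size = tv then ([tv], [sv])
  else ([PySem.Int.floordiv tv size, size], [sv, 1])

-- the per-dimension segment B emits
def segB (tensor_shape : List Int) (scale_shape : List Int) (m : Nat) (d : Nat) : List Int × List Int :=
  pyB_emit tensor_shape scale_shape m ([], []) d

theorem floordiv_exact (a b : Int) (h : b ∣ a) : PySem.Int.floordiv a b * b = a := by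
  have h1 := PySem.Int.floordiv_mul_add_mod a b
  rw [(PySem.Int.mod_eq_zero_iff_dvd a b).mpr h] at h1
  omega

theorem loop1_char (t s : List Int) (k : Nat) :
    (List.range k).foldl (pyA_loop1 t s.length) (s, []) =
      (s ++ List.replicate (k - s.length) 1, (List.range k).filter (blkP t s)) := by
  induction k with
  | zero => simp
  | succ k ih =>
    rw [List.range_succ, List.foldl_append, List.filter_append, ih]
    by_cases hk : k < s.length
    · have e0 : k - s.length = 0 := by omega
      have e1 : k + 1 - s.length = 0 := by omega
      simp only [e0, e1, List.replicate_zero, List.append_nil, List.foldl_cons, List.foldl_nil,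
        pyA_loop1, List.filter_singleton]
      rw [if_pos hk]
      by_cases hcond : s.getD k 0 = t.getD k 0
      · have hb : blkP t s k = false := by
          unfold blkP; rw [if_pos hk]; exact decide_eq_false (not_not_intro hcond)
        rw [if_neg (not_not_intro hcond), hb, Bool.cond_false, List.append_nil]
      · have hb : blkP t s k = true := by
          unfold blkP; rw [if_pos hk]; exact decide_eq_true hcond
        rw [if_pos hcond, hb, Bool.cond_true]
    · have h1 : (k + 1) - s.length = (k - s.length) + 1 := by omega
      simp [pyA_loop1, blkP, hk, h1, List.replicate_succ']

theorem stepA_prefix (t s u v : List Int) (ax : Nat) (h : t.length = s.length) (hax : ax < t.length) :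
    pyA_step (t ++ u, s ++ v) ax = ((pyA_step (t, s) ax).1 ++ u, (pyA_step (t, s) ax).2 ++ v) := by
  have h1 : (t ++ u).getD ax 0 = t.getD ax 0 := List.getD_append _ _ _ _ hax
  have h2 : (s ++ v).getD ax 0 = s.getD ax 0 := List.getD_append _ _ _ _ (by omega)
  simp only [pyA_step, h1, h2]
  split
  · rfl
  · simp [List.take_append_of_le_length (by omega : ax ≤ t.length),
      List.take_append_of_le_length (by omega : ax ≤ s.length),
      List.drop_append_of_le_length (by omega : ax + 1 ≤ t.length),
      List.drop_append_of_le_length (by omega : ax + 1 ≤ s.length)]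

theorem stepA_len (t s : List Int) (ax : Nat) (h : t.length = s.length) (hax : ax < t.length) :
    (pyA_step (t, s) ax).1.length = (pyA_step (t, s) ax).2.length ∧
    t.length ≤ (pyA_step (t, s) ax).1.length := by
  simp only [pyA_step]
  split
  · simp [h]
  · simp
    omega

theorem foldl_prefix (l : List Nat) : ∀ (t s u v : List Int), t.length = s.length →
    (∀ ax ∈ l, ax < t.length) →
    List.foldl pyA_step (t ++ u, s ++ v) l =
      ((List.foldl pyA_step (t, s) l).1 ++ u, (List.foldl pyA_step (t, s) l).2 ++ v) := by
  induction l with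
  | nil => intro t s u v _ _; rfl
  | cons ax l ih =>
    intro t s u v h hm
    have hax : ax < t.length := hm ax (by simp)
    have hlen := stepA_len t s ax h hax
    rw [List.foldl_cons, List.foldl_cons, stepA_prefix t s u v ax h hax]
    exact ih _ _ u v hlen.1 (fun a ha => lt_of_lt_of_le (hm a (by simp [ha])) hlen.2)

theorem stepA_last (t s : List Int) (a b : Int) (h : t.length = s.length) :
    pyA_step (t ++ [a], s ++ [b]) t.length = (t ++ (segA a b).1, s ++ (segA a b).2) := by
  have h1 : (t ++ [a]).getD t.length 0 = a := by
    rw [List.getD_append_right _ _ _ _ (le_refl _)]; simp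
  have h2 : (s ++ [b]).getD t.length 0 = b := by
    rw [h, List.getD_append_right _ _ _ _ (le_refl _)]; simp
  simp only [pyA_step, segA, h1, h2]
  split
  · simp
  · have e1 : (t ++ [a]).take t.length = t := by simp
    have e2 : (t ++ [a]).drop (t.length + 1) = ([] : List Int) := by simp
    have e3 : (s ++ [b]).take t.length = s := by rw [h]; simp
    have e4 : (s ++ [b]).drop (t.length + 1) = ([] : List Int) := by rw [h]; simp
    rw [e1, e2, e3, e4]; simp

theorem foldA_flatten (p : Nat → Bool) : ∀ (t s : List Int), t.length = s.length →
    List.foldl pyA_step (t, s) (((List.range t.length).filter p).reverse) =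
      ((List.range t.length).flatMap
          (fun d => if p d then (segA (t.getD d 0) (s.getD d 0)).1 else [t.getD d 0]),
       (List.range t.length).flatMap
          (fun d => if p d then (segA (t.getD d 0) (s.getD d 0)).2 else [s.getD d 0])) := by
  intro t
  induction t using List.reverseRecOn with
  | nil => intro s h; simp [List.length_eq_zero_iff.mp h.symm]
  | append_singleton t₀ a ih =>
    intro s h
    rcases s.eq_nil_or_concat with rfl | ⟨s₀, b, rfl⟩
    · simp at h
    rw [List.concat_eq_append] at h ⊢
    have hlen : t₀.length = s₀.length := by simp at h; omega
    have hn : (t₀ ++ [a]).length = t₀.length + 1 := by simp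
    rw [hn, List.range_succ, List.filter_append, List.reverse_append]
    have hmem : ∀ ax ∈ ((List.range t₀.length).filter p).reverse, ax < t₀.length := by
      intro ax hax
      rw [List.mem_reverse, List.mem_filter] at hax
      exact List.mem_range.mp hax.1
    have hgt : ∀ d < t₀.length, (t₀ ++ [a]).getD d 0 = t₀.getD d 0 :=
      fun d hd => List.getD_append _ _ _ _ hd
    have hgs : ∀ d < t₀.length, (s₀ ++ [b]).getD d 0 = s₀.getD d 0 :=
      fun d hd => List.getD_append _ _ _ _ (by omega)
    have hta : (t₀ ++ [a]).getD t₀.length 0 = a := by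
      rw [List.getD_append_right _ _ _ _ (le_refl _)]; simp
    have hsb : (s₀ ++ [b]).getD t₀.length 0 = b := by
      rw [hlen, List.getD_append_right _ _ _ _ (le_refl _)]; simp
    have hstate : List.foldl pyA_step (t₀ ++ [a], s₀ ++ [b]) ((List.filter p [t₀.length]).reverse)
        = (t₀ ++ (if p t₀.length then (segA a b).1 else [a]),
           s₀ ++ (if p t₀.length then (segA a b).2 else [b])) := by
      by_cases hp : p t₀.length
      · simp [hp, stepA_last t₀ s₀ a b hlen]
      · simp [hp]
    rw [List.foldl_append, hstate,
      foldl_prefix _ t₀ s₀ _ _ hlen hmem, ih s₀ hlen]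
    have hmapt : ∀ (f : Int → Int → List Int × List Int),
        (List.range t₀.length).flatMap
            (fun d => if p d then (f ((t₀ ++ [a]).getD d 0) ((s₀ ++ [b]).getD d 0)).1
              else [(t₀ ++ [a]).getD d 0]) =
          (List.range t₀.length).flatMap
            (fun d => if p d then (f (t₀.getD d 0) (s₀.getD d 0)).1 else [t₀.getD d 0]) := by
      intro f
      apply List.flatMap_congr
      intro d hd
      rw [hgt d (List.mem_range.mp hd), hgs d (List.mem_range.mp hd)]
    have hmaps : ∀ (f : Int → Int → List Int × List Int),
        (List.range t₀.length).flatMap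
            (fun d => if p d then (f ((t₀ ++ [a]).getD d 0) ((s₀ ++ [b]).getD d 0)).2
              else [(s₀ ++ [b]).getD d 0]) =
          (List.range t₀.length).flatMap
            (fun d => if p d then (f (t₀.getD d 0) (s₀.getD d 0)).2 else [s₀.getD d 0]) := by
      intro f
      apply List.flatMap_congr
      intro d hd
      rw [hgt d (List.mem_range.mp hd), hgs d (List.mem_range.mp hd)]
    rw [List.flatMap_append, List.flatMap_append, hmapt segA, hmaps segA]
    have hsb' : (s₀ ++ [b])[t₀.length]?.getD 0 = b := by
      rw [hlen]
      simp
    by_cases hp : p t₀.length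
    · simp [hp, hta, hsb, hsb']
    · simp [hp, hta, hsb, hsb']

theorem emit_acc (t s : List Int) (m : Nat) (acc : List Int × List Int) (d : Nat) :
    pyB_emit t s m acc d = (acc.1 ++ (segB t s m d).1, acc.2 ++ (segB t s m d).2) := by
  simp only [segB, pyB_emit]
  split_ifs <;> simp_all

theorem foldB_flatten (l : List Nat) : ∀ (acc : List Int × List Int) (t s : List Int) (m : Nat),
    List.foldl (pyB_emit t s m) acc l =
      (acc.1 ++ l.flatMap (fun d => (segB t s m d).1),
       acc.2 ++ l.flatMap (fun d => (segB t s m d).2)) := by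
  induction l with
  | nil => intro acc t s m; simp
  | cons d l ih =>
    intro acc t s m
    rw [List.foldl_cons, emit_acc, ih]
    simp

-- the per-dimension agreement of A's segments with B's, under Pre_'s facts
theorem seg_eq (t s : List Int)
    (hdvd : ∀ d < s.length, s.getD d 0 ≠ t.getD d 0 → s.getD d 0 ∣ t.getD d 0)
    (hmn : s.length ≤ t.length) (d : Nat) (hd : d < t.length) :
    (if blkP t s d
        then (segA (t.getD d 0) ((s ++ List.replicate (t.length - s.length) 1).getD d 0)).1
        else [t.getD d 0],
     if blkP t s d
        then (segA (t.getD d 0) ((s ++ List.replicate (t.length - s.length) 1).getD d 0)).2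
        else [(s ++ List.replicate (t.length - s.length) 1).getD d 0]) =
      segB t s s.length d := by
  by_cases hm : d < s.length
  · have hpad : (s ++ List.replicate (t.length - s.length) 1).getD d 0 = s.getD d 0 :=
      List.getD_append _ _ _ _ hm
    have hdv' := hdvd d hm
    rw [hpad]
    simp only [segB, pyB_emit, blkP, segA]
    generalize hT : t.getD d 0 = tD at hdv' ⊢
    generalize hS : s.getD d 0 = sD at hdv' ⊢
    by_cases hne : sD = tD
    · simp [hm, hne]
    · have hdv : sD ∣ tD := hdv' hne
      have hs0 : sD ≠ 0 := by
        intro h0; rw [h0] at hdv; exact hne (by rw [h0, zero_dvd_iff.mp hdv])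
      have hx : PySem.Int.floordiv tD sD * sD = tD := floordiv_exact _ _ hdv
      by_cases hsz : PySem.Int.floordiv tD sD = tD
      · simp [hm, hne, hsz]
      · have hsznz : PySem.Int.floordiv tD sD ≠ 0 := by
          intro h0
          have ht0 : tD = 0 := by rw [← hx, h0]; ring
          exact hsz (by rw [h0, ht0])
        have hdv2 : PySem.Int.floordiv tD sD ∣ tD := ⟨sD, hx.symm⟩
        have hx2 : PySem.Int.floordiv tD (PySem.Int.floordiv tD sD) * PySem.Int.floordiv tD sD = tD :=
          floordiv_exact _ _ hdv2
        have hfin : PySem.Int.floordiv tD (PySem.Int.floordiv tD sD) = sD := by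
          apply mul_right_cancel₀ hsznz
          rw [hx2]
          linarith [hx, mul_comm sD (PySem.Int.floordiv tD sD)]
        simp [hm, hne, hsz, hfin]
  · have hlt : d - s.length < t.length - s.length := by omega
    have hpad : (s ++ List.replicate (t.length - s.length) 1).getD d 0 = 1 := by
      rw [List.getD_append_right _ _ _ _ (by omega)]
      simp [List.getD, hlt]
    have hone : PySem.Int.floordiv (t.getD d 0) 1 = t.getD d 0 := by
      have := floordiv_exact (t.getD d 0) 1 (one_dvd _)
      omega
    rw [hpad]
    simp [blkP, hm, segA, segB, pyB_emit]

-- ===== VERDICT (by name: the statement is the Claim_ definition above) =====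
theorem get_broadcastable_shapes_for_blockwise_scale_dequantize_spec : Claim_equal_get_broadcastable_shapes_for_blockwise_scale_dequantize := by
  intro t s _ hpre
  obtain ⟨hmn, hdims, _⟩ := hpre
  show get_broadcastable_shapes_for_blockwise_scale_dequantize t s =
    get_broadcastable_shapes_for_blockwise_scale_dequantize_alt t s
  have hlenpad : t.length = (s ++ List.replicate (t.length - s.length) 1).length := by
    simp; omega
  rw [get_broadcastable_shapes_for_blockwise_scale_dequantize,
    get_broadcastable_shapes_for_blockwise_scale_dequantize_alt]
  simp only [loop1_char t s t.length]
  rw [foldA_flatten (blkP t s) t _ hlenpad, foldB_flatten]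
  simp only [List.nil_append]
  have := fun d hd => seg_eq t s (fun d hd => (hdims d hd).2) hmn d hd
  rw [Prod.mk.injEq]
  constructor
  · apply List.flatMap_congr
    intro d hd
    exact congrArg Prod.fst (this d (List.mem_range.mp hd))
  · apply List.flatMap_congr
    intro d hd
    exact congrArg Prod.snd (this d (List.mem_range.mp hd))
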